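-- pv_equiv track=rewrite | github.com/Suvaidyam/frappe_theme | frappe_theme/utils/sql_builder.py | _find_clause_end
-- ===== SOURCE A (Python) =====
-- def _find_clause_end(sql: str, where_pos: int) -> int:
-- 	"""Find where the WHERE clause ends (before GROUP BY, ORDER BY, LIMIT, etc.)."""
-- 	keywords = ["GROUP BY", "HAVING", "ORDER BY", "LIMIT", "UNION"]
-- 	upper_sql = sql.upper()
-- 	depth = 0
-- 	i = where_pos + 5
--
-- 	while i < len(sql):
-- 		if sql[i] == "(":
-- 			depth += 1
-- 		elif sql[i] == ")":
-- 			depth -= 1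
-- 		elif depth == 0:
-- 			for kw in keywords:
-- 				if upper_sql[i : i + len(kw)] == kw:
-- 					before_ok = i == 0 or not upper_sql[i - 1].isalnum()
-- 					after_ok = i + len(kw) >= len(sql) or not upper_sql[i + len(kw)].isalnum()
-- 					if before_ok and after_ok:
-- 						return i
-- 		i += 1
--
-- 	return len(sql)
-- ===== SOURCE B (Python) =====
-- KEYWORDS = ("GROUP BY", "HAVING", "ORDER BY", "LIMIT", "UNION")
--
--
-- def _starts_clause(upper_sql, n, i):
-- 	"""True iff a clause keyword starts at i with non-alphanumeric boundaries."""
-- 	for kw in KEYWORDS: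
-- 		if upper_sql.startswith(kw, i, n):
-- 			if (i == 0 or not upper_sql[i - 1].isalnum()) and (
-- 				i + len(kw) >= n or not upper_sql[i + len(kw)].isalnum()
-- 			):
-- 				return True
-- 	return False
--
--
-- def _find_clause_end(sql, where_pos):
-- 	upper_sql = sql.upper()
-- 	n = len(sql)
-- 	start = where_pos + 5
-- 	candidates = [i for i in range(start, n) if _starts_clause(upper_sql, n, i)]
-- 	for c in candidates:
-- 		if sql.count("(", start, c) == sql.count(")", start, c):
-- 			return c
-- 	return n
-- ===== Notes on version B (the rewrite author's own statement) =====
-- stated objective: alternative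
-- what changed: A's single stateful scan (running paren depth updated char-by-char with an inline keyword check and early return) is re-decomposed into two phases: first collect all boundary-checked keyword candidate positions after the WHERE clause, then return the first candidate whose range has an equal count of '(' and ')' (net balance zero), computed with str.count over the slice.
-- outside the precondition, e.g. on _find_clause_end('(LIMIT ', -9): A returns 7, B returns 1; on _find_clause_end('x', -10): A raises IndexError, B returns 1
import Mathlib
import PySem

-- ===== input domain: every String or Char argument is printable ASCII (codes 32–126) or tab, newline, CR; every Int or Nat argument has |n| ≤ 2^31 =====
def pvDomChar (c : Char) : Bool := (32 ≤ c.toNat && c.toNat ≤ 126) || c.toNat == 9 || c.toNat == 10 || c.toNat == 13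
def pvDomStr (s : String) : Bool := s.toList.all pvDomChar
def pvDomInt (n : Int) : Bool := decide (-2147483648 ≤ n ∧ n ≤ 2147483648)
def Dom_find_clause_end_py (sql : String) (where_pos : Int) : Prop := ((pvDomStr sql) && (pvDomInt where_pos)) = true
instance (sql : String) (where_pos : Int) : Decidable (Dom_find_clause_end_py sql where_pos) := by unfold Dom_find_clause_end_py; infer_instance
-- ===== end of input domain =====

-- B re-decomposes A's single stateful scan into two phases (collect keyword candidates, then pick the first with
-- zero net parenthesis balance via range counts); equivalence of the return values is proved on Pre_ (no side effects).

-- the literal `keywords` list both Python versions carry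
def pvKeywords : List String := ["GROUP BY", "HAVING", "ORDER BY", "LIMIT", "UNION"]

-- `upper_sql[j].isalnum()` is False / the index does not exist: shared by both ports' boundary tests
def pvNotAlnumAt (us : List Char) (j : Nat) : Bool :=
  match us[j]? with
  | some c => !PySem.Chars.isalnum c
  | none => true

-- ===== PORT A =====
-- the inner `for kw in keywords: … return i` of A: true iff some keyword slice-matches at i with ok boundaries
def pvKwReturnA (us : List Char) (n i : Nat) : Bool :=
  pvKeywords.any fun kw =>
    let k := kw.toList.length
    (PySem.List.slice us (some (i : Int)) (some ((i + k : Nat) : Int)) == kw.toList) &&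
    ((decide (i = 0) || pvNotAlnumAt us (i - 1)) &&
     (decide (n ≤ i + k) || pvNotAlnumAt us (i + k)))

-- A's `while i < len(sql)` loop; `depth` is the running parenthesis depth
def pvALoop (cs us : List Char) (i : Nat) (depth : Int) : Int :=
  if h : i < cs.length then
    if cs[i] = '(' then pvALoop cs us (i + 1) (depth + 1)
    else if cs[i] = ')' then pvALoop cs us (i + 1) (depth - 1)
    else if depth = 0 && pvKwReturnA us cs.length i then (i : Int)
    else pvALoop cs us (i + 1) depth
  else (cs.length : Int)
termination_by cs.length - i

-- negative i (where_pos + 5 < 0) is excluded by Pre_ (Python wraps or raises there), so the port enters at .toNat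
def find_clause_end_py (sql : String) (where_pos : Int) : Int :=
  let cs := sql.toList
  let us := PySem.Chars.upper cs
  pvALoop cs us (where_pos + 5).toNat 0

-- ===== PORT B =====
-- Source B's _starts_clause: `upper_sql.startswith(kw, i, n)` with n = len(upper_sql) is exactly `kw <+: us.drop i` for 0 ≤ i
def pvStartsClause (us : List Char) (n i : Nat) : Bool :=
  pvKeywords.any fun kw =>
    PySem.Chars.startswith (us.drop i) kw.toList &&
    ((decide (i = 0) || pvNotAlnumAt us (i - 1)) &&
     (decide (n ≤ i + kw.toList.length) || pvNotAlnumAt us (i + kw.toList.length)))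

-- `sql.count("(", start, c)` for a single-character needle is exactly the List.count of the slice
def pvParenBalanced (cs : List Char) (start c : Int) : Bool :=
  (PySem.List.slice cs (some start) (some c)).count '(' ==
  (PySem.List.slice cs (some start) (some c)).count ')'

def find_clause_end_py_alt (sql : String) (where_pos : Int) : Int :=
  let cs := sql.toList
  let us := PySem.Chars.upper cs
  let n := cs.length
  let start := where_pos + 5
  -- `[i for i in range(start, n) if _starts_clause(upper_sql, n, i)]`; i.toNat is exact for the i ≥ 0 admitted by Pre_
  let candidates := (PySem.List.pyRange start (n : Int) 1).filter (fun i => pvStartsClause us n i.toNat)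
  match candidates.find? (fun c => pvParenBalanced cs start c) with
  | some c => c
  | none => (n : Int)

-- ===== PRECONDITION & SPEC =====
-- Pre_ excludes negative scan starts (where_pos + 5 < 0), outside the natural domain of a WHERE-clause position:
-- there A raises IndexError or applies Python's negative-index wraparound.
def Pre_find_clause_end_py (sql : String) (where_pos : Int) : Prop := 0 ≤ where_pos + 5
instance (sql : String) (where_pos : Int) : Decidable (Pre_find_clause_end_py sql where_pos) := by unfold Pre_find_clause_end_py; infer_instance
def pvWitness_find_clause_end_py : String × Int := ("SELECT a FROM t WHERE x = (1) ORDER BY a LIMIT 2", 16)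
def Spec_find_clause_end_py (sql : String) (where_pos : Int) (out : Int) : Prop := out = find_clause_end_py_alt sql where_pos
instance (sql : String) (where_pos : Int) (out : Int) : Decidable (Spec_find_clause_end_py sql where_pos out) := by unfold Spec_find_clause_end_py; infer_instance

-- ===== CLAIM (what is proved, stated in full; the proofs are below) =====
def Claim_equal_find_clause_end_py : Prop := ∀ (sql : String) (where_pos : Int), Dom_find_clause_end_py sql where_pos → Pre_find_clause_end_py sql where_pos → Spec_find_clause_end_py sql where_pos (find_clause_end_py sql where_pos)

-- ===== LEMMAS AND PROOFS =====

-- the ascending position list [i, …, n-1] both sides are shown to traverse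
def pvFrom (i n : Nat) : List Nat :=
  if i < n then i :: pvFrom (i + 1) n else []
termination_by n - i

-- net parenthesis balance of cs[s:i]
def pvBal (cs : List Char) (s i : Nat) : Int :=
  (((cs.drop s).take (i - s)).count '(' : Int) - (((cs.drop s).take (i - s)).count ')' : Int)

theorem pvWitness_ok : Dom_find_clause_end_py (pvWitness_find_clause_end_py.1) (pvWitness_find_clause_end_py.2) ∧ Pre_find_clause_end_py (pvWitness_find_clause_end_py.1) (pvWitness_find_clause_end_py.2) := by
  constructor <;> decide

lemma pvPrefix_head {kw l : List Char} (h : kw <+: l) (hne : kw ≠ []) : l.head? = kw.head? := by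
  obtain ⟨t, rfl⟩ := h
  cases kw with
  | nil => exact absurd rfl hne
  | cons a tl => rfl

-- a keyword can only start at an (alphabetic) letter, never at a parenthesis
lemma pvStarts_ne_paren (cs : List Char) (i : Nat) (h : i < cs.length)
    (hc : cs[i] = '(' ∨ cs[i] = ')') :
    pvStartsClause (PySem.Chars.upper cs) cs.length i = false := by
  by_contra hne
  rw [Bool.not_eq_false] at hne
  unfold pvStartsClause at hne
  rw [List.any_eq_true] at hne
  obtain ⟨kw, hkw, hp⟩ := hne
  have hp1 : PySem.Chars.startswith ((PySem.Chars.upper cs).drop i) kw.toList = true := by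
    cases hS : PySem.Chars.startswith ((PySem.Chars.upper cs).drop i) kw.toList
    · rw [hS] at hp; simp at hp
    · rfl
  have hpre : kw.toList <+: (PySem.Chars.upper cs).drop i :=
    (PySem.Chars.startswith_iff _ _).mp hp1
  have halpha := List.all_eq_true.mp
    (by decide : pvKeywords.all (fun kw => kw.toList.head?.elim false PySem.Chars.isalpha) = true) kw hkw
  have hup : ((PySem.Chars.upper cs).drop i).head? = some (PySem.Chars.upperChar cs[i]) := by
    show ((cs.map PySem.Chars.upperChar).drop i).head? = _
    rw [← List.map_drop, List.head?_map, List.head?_eq_getElem?, List.getElem?_drop,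
      Nat.add_zero, List.getElem?_eq_getElem h]
    rfl
  cases hkl : kw.toList with
  | nil => rw [hkl] at halpha; simp at halpha
  | cons c t =>
    rw [hkl] at halpha hpre
    have hhd : ((PySem.Chars.upper cs).drop i).head? = some c := pvPrefix_head hpre (by simp)
    rw [hup] at hhd
    have hc' : PySem.Chars.upperChar cs[i] = c := by simpa using hhd
    simp only [List.head?_cons, Option.elim] at halpha
    rcases hc with hc | hc <;> rw [hc] at hc' <;> rw [← hc'] at halpha <;>
      exact absurd halpha (by decide)

-- A's slice comparison at i agrees with B's startswith on the suffix
lemma pvSliceMatch (us kw : List Char) (i : Nat) :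
    (PySem.List.slice us (some (i : Int)) (some ((i + kw.length : Nat) : Int)) == kw) =
      PySem.Chars.startswith (us.drop i) kw := by
  rw [PySem.List.slice_toNat us (by positivity) (by positivity)]
  simp only [Int.toNat_natCast]
  have hk : i + kw.length - i = kw.length := by omega
  rw [hk, Bool.eq_iff_iff, beq_iff_eq, PySem.Chars.startswith_iff]
  constructor
  · intro hE; exact List.prefix_iff_eq_take.mpr hE.symm
  · intro hE; exact (List.prefix_iff_eq_take.mp hE).symm

-- A's keyword test and B's _starts_clause agree pointwise
lemma pvKw_eq_starts (us : List Char) (n i : Nat) :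
    pvKwReturnA us n i = pvStartsClause us n i := by
  unfold pvKwReturnA pvStartsClause
  congr 1
  funext kw
  dsimp only
  rw [pvSliceMatch]

lemma pvBal_succ (cs : List Char) (s i : Nat) (hs : s ≤ i) (h : i < cs.length) :
    pvBal cs s (i + 1) = pvBal cs s i +
      (if cs[i] = '(' then 1 else if cs[i] = ')' then -1 else 0) := by
  unfold pvBal
  have h1 : i + 1 - s = (i - s) + 1 := by omega
  have h2 : (cs.drop s)[i - s]? = some cs[i] := by
    rw [List.getElem?_drop]
    have : s + (i - s) = i := by omega
    rw [this, List.getElem?_eq_getElem h]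
  rw [h1, List.take_add_one, h2]
  simp only [Option.toList_some, List.count_append, List.count_singleton]
  by_cases hp : cs[i] = '(' <;> by_cases hq : cs[i] = ')' <;> simp [hp, hq] <;> omega

lemma pvFrom_stop (i n : Nat) (h : ¬ i < n) : pvFrom i n = [] := by
  rw [pvFrom]; simp [h]

lemma pvFrom_cons (i n : Nat) (h : i < n) : pvFrom i n = i :: pvFrom (i + 1) n := by
  rw [pvFrom]; simp [h]

-- the main loop invariant: A's scan from i with depth = pvBal cs s i returns the first position j ≥ i
-- with a boundary-ok keyword and zero balance, else len(sql)
lemma pvALoop_eq (cs : List Char) (s : Nat) :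
    ∀ i, s ≤ i →
    pvALoop cs (PySem.Chars.upper cs) i (pvBal cs s i) =
      match (pvFrom i cs.length).find?
          (fun j => pvStartsClause (PySem.Chars.upper cs) cs.length j && decide (pvBal cs s j = 0)) with
      | some j => (j : Int)
      | none => (cs.length : Int) := by
  suffices H : ∀ m i, cs.length - i = m → s ≤ i →
      pvALoop cs (PySem.Chars.upper cs) i (pvBal cs s i) =
        match (pvFrom i cs.length).find?
            (fun j => pvStartsClause (PySem.Chars.upper cs) cs.length j && decide (pvBal cs s j = 0)) with
        | some j => (j : Int)
        | none => (cs.length : Int) by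
    intro i hi; exact H (cs.length - i) i rfl hi
  intro m
  induction m with
  | zero =>
    intro i hm hi
    have hge : ¬ i < cs.length := by omega
    rw [pvALoop, dif_neg hge, pvFrom_stop i cs.length hge]
    simp
  | succ m ih =>
    intro i hm hi
    have hlt : i < cs.length := by omega
    have hm' : cs.length - (i + 1) = m := by omega
    rw [pvALoop, dif_pos hlt, pvFrom_cons i cs.length hlt]
    by_cases hp : cs[i] = '('
    · rw [if_pos hp, List.find?_cons_of_neg
        (by simp [pvStarts_ne_paren cs i hlt (Or.inl hp)])]
      have hb : pvBal cs s i + 1 = pvBal cs s (i + 1) := by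
        rw [pvBal_succ cs s i hi hlt, if_pos hp]
      rw [hb]
      exact ih (i + 1) hm' (by omega)
    · rw [if_neg hp]
      by_cases hq : cs[i] = ')'
      · rw [if_pos hq, List.find?_cons_of_neg
          (by simp [pvStarts_ne_paren cs i hlt (Or.inr hq)])]
        have hb : pvBal cs s i - 1 = pvBal cs s (i + 1) := by
          rw [pvBal_succ cs s i hi hlt, if_neg hp, if_pos hq]; omega
        rw [hb]
        exact ih (i + 1) hm' (by omega)
      · rw [if_neg hq]
        have hb : pvBal cs s i = pvBal cs s (i + 1) := by
          rw [pvBal_succ cs s i hi hlt, if_neg hp, if_neg hq]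
          ring
        by_cases h0 : pvBal cs s i = 0
        · by_cases hk : pvKwReturnA (PySem.Chars.upper cs) cs.length i = true
          · rw [if_pos (by simp [h0, hk]), List.find?_cons_of_pos
              (by simp [← pvKw_eq_starts, hk, h0])]
          · rw [if_neg (by simp [hk]), List.find?_cons_of_neg
              (by simp [← pvKw_eq_starts]; intro hcon; exact absurd hcon hk), hb]
            exact ih (i + 1) hm' (by omega)
        · rw [if_neg (by simp [h0]), List.find?_cons_of_neg (by simp [h0]), hb]
          exact ih (i + 1) hm' (by omega)

-- B's range of candidate positions is pvFrom, cast to Int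
lemma pvRange_eq_from (n s : Nat) :
    PySem.List.pyRange (s : Int) (n : Int) 1 = (pvFrom s n).map (fun j : Nat => (j : Int)) := by
  suffices H : ∀ m s, n - s = m →
      PySem.List.pyRange (s : Int) (n : Int) 1 = (pvFrom s n).map (fun j : Nat => (j : Int)) by
    exact H (n - s) s rfl
  intro m
  induction m with
  | zero =>
    intro s hm
    have hge : ¬ s < n := by omega
    rw [pvFrom_stop s n hge]
    unfold PySem.List.pyRange
    simp only [if_neg (by omega : ¬ (s : Int) < (n : Int))]
    split <;> simp_all
  | succ m ih =>
    intro s hm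
    have hlt : s < n := by omega
    rw [PySem.List.pyRange_one_cons (by exact_mod_cast hlt), pvFrom_cons s n hlt]
    have : (s : Int) + 1 = ((s + 1 : Nat) : Int) := by push_cast; ring
    rw [this, ih (s + 1) (by omega)]
    rfl

-- B's balance test at a nonnegative candidate is exactly `pvBal = 0`
lemma pvBalanced_eq (cs : List Char) (s j : Nat) :
    pvParenBalanced cs (s : Int) (j : Int) = decide (pvBal cs s j = 0) := by
  unfold pvParenBalanced
  rw [PySem.List.slice_toNat cs (by positivity) (by positivity)]
  simp only [Int.toNat_natCast]
  unfold pvBal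
  rw [Bool.eq_iff_iff, beq_iff_eq, decide_eq_true_iff]
  omega

lemma pvFind?_congr {α : Type} (l : List α) (p q : α → Bool) (h : ∀ a, p a = q a) :
    l.find? p = l.find? q := by
  rw [funext h]

-- ===== VERDICT (by name: the statement is the Claim_ definition above) =====
theorem find_clause_end_py_spec : Claim_equal_find_clause_end_py := by
  intro sql where_pos _hdom hpre
  unfold Spec_find_clause_end_py
  unfold Pre_find_clause_end_py at hpre
  simp only [find_clause_end_py, find_clause_end_py_alt]
  set cs := sql.toList with hcs
  set s : Nat := (where_pos + 5).toNat with hsdef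
  have hcast : where_pos + 5 = (s : Int) := by omega
  rw [hcast]
  have h0 : pvBal cs s s = 0 := by simp [pvBal]
  have hA := pvALoop_eq cs s s (le_refl s)
  rw [h0] at hA
  have hRHS : List.find? (fun c => pvParenBalanced cs ((s : Nat) : Int) c)
      (List.filter (fun i : Int => pvStartsClause (PySem.Chars.upper cs) cs.length i.toNat)
        ((pvFrom s cs.length).map (fun j : Nat => (j : Int)))) =
      Option.map (fun j : Nat => (j : Int))
        ((pvFrom s cs.length).find?
          (fun j => pvStartsClause (PySem.Chars.upper cs) cs.length j && decide (pvBal cs s j = 0))) := by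
    rw [List.filter_map, List.find?_map, List.find?_filter]
    exact congrArg (Option.map _)
      (pvFind?_congr _ _ _ (fun j => by rw [Bool.eq_iff_iff]; simp [pvBalanced_eq]))
  rw [hA, pvRange_eq_from cs.length s, hRHS]
  cases hE : (pvFrom s cs.length).find?
      (fun j => pvStartsClause (PySem.Chars.upper cs) cs.length j && decide (pvBal cs s j = 0)) <;>
    simp only [hE, Option.map]
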